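-- pv_equiv track=rewrite | github.com/irlxrd/IOT-SECURITY-ML-MODEL | CIC-IDS2017.py | find_label_column
-- ===== SOURCE A (Python) =====
-- def find_label_column(columns):
--     # try direct match 'label' ignoring case and surrounding spaces
--     for c in columns:
--         if c.strip().lower() == "label":
--             return c
--     # fallback: any column name containing 'label' (case-insensitive)
--     for c in columns:
--         if "label" in c.lower():
--             return c
--     return None
-- ===== SOURCE B (Python) =====
-- def find_label_column(columns):
--     fallback = None
--     for c in columns:
--         if c.strip().lower() == "label":
--             return c
--         if fallback is None and "label" in c.lower():
--             fallback = c
--     return fallback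
-- ===== Notes on version B (the rewrite author's own statement) =====
-- stated objective: simpler
-- what changed: Replaces A's two sequential scans over the column list by a single pass that returns immediately on an exact 'label' match and remembers the first substring match as a fallback.
import Mathlib
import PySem

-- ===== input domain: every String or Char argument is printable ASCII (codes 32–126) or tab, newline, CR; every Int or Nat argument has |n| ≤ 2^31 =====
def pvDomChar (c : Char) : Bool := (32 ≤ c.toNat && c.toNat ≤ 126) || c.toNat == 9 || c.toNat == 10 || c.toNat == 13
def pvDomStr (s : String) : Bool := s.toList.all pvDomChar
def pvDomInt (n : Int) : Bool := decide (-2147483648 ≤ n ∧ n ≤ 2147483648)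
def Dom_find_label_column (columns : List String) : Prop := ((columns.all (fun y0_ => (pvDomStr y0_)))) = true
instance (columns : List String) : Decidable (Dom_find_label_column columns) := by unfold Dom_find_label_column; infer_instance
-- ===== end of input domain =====

-- B replaces A's two sequential scans by a single pass that returns on an exact 'label' match
-- and remembers the first substring match as a fallback (objective: simpler; same cost).


-- ===== PORT A =====
-- first loop of A: return the first column whose stripped, lowered name equals "label"
def pvFindExact : List String → Option String
  | [] => none
  | c :: cs => if PySem.Str.lower (PySem.Str.strip c) = "label" then some c else pvFindExact cs

-- second loop of A: return the first column whose lowered name contains "label"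
def pvFindSub : List String → Option String
  | [] => none
  | c :: cs => if PySem.Str.isIn "label" (PySem.Str.lower c) then some c else pvFindSub cs

def find_label_column (columns : List String) : Option String :=
  match pvFindExact columns with
  | some c => some c
  | none => pvFindSub columns

-- ===== PORT B =====
-- B: one pass; return on exact match, remember first substring match as fallback
def pvAltGo : List String → Option String → Option String
  | [], fallback => fallback
  | c :: cs, fallback =>
      if PySem.Str.lower (PySem.Str.strip c) = "label" then some c
      else pvAltGo cs
        (if fallback.isNone && PySem.Str.isIn "label" (PySem.Str.lower c) then some c else fallback)

def find_label_column_alt (columns : List String) : Option String :=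
  pvAltGo columns none

-- ===== PRECONDITION & SPEC =====
def Spec_find_label_column (columns : List String) (out : Option String) : Prop := out = find_label_column_alt columns
instance (columns : List String) (out : Option String) : Decidable (Spec_find_label_column columns out) := by unfold Spec_find_label_column; infer_instance

-- ===== CLAIM (what is proved, stated in full; the proofs are below) =====
def Claim_equal_find_label_column : Prop := ∀ (columns : List String), Dom_find_label_column columns → Spec_find_label_column columns (find_label_column columns)

-- ===== LEMMAS AND PROOFS =====

-- ===== VERDICT (by name: the statement is the Claim_ definition above) =====
theorem pvAltGo_eq (cs : List String) (fb : Option String) :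
    pvAltGo cs fb =
      match pvFindExact cs with
      | some x => some x
      | none => match fb with
                | some y => some y
                | none => pvFindSub cs := by
  induction cs generalizing fb with
  | nil => cases fb <;> rfl
  | cons c cs ih =>
    by_cases hx : PySem.Str.lower (PySem.Str.strip c) = "label"
    · simp [pvAltGo, pvFindExact, hx]
    · cases fb with
      | some y => simp [pvAltGo, pvFindExact, hx, ih]
      | none =>
        by_cases hs : PySem.Chars.isIn ['l','a','b','e','l'] (PySem.Chars.lower c.toList) = true <;>
          simp [pvAltGo, pvFindExact, pvFindSub, PySem.Str.isIn, hx, hs, ih] <;>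
          cases pvFindExact cs <;> simp [hs]

theorem find_label_column_spec : Claim_equal_find_label_column := by
  intro columns _
  unfold Spec_find_label_column find_label_column find_label_column_alt
  rw [pvAltGo_eq]
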